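-- pv_equiv track=rewrite | github.com/Ch-Lokesh-21/Agentic-Multimodal-Document-Assistant | backend/rag_system/tools/visual_detection.py | detect_visual_elements
-- ===== SOURCE A (Python) =====
-- def detect_visual_elements(text_chunks: list[str]) -> bool:
--     """
--     Check if text chunks mention visual elements.
--
--     Args:
--         text_chunks: List of text chunks to analyze
--
--     Returns:
--         True if visual keywords are found, False otherwise
--     """
--     visual_keywords = [
--         "figure", "diagram", "table", "chart", "graph", "image",
--         "photo", "illustration", "visual", "picture", "snapshot"
--     ]
--     return any(
--         any(kw in chunk.lower() for kw in visual_keywords)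
--         for chunk in text_chunks
--     )
-- ===== SOURCE B (Python) =====
-- _VISUAL_KEYWORDS = (
--     "figure", "diagram", "table", "chart", "graph", "image",
--     "photo", "illustration", "visual", "picture", "snapshot"
-- )
--
-- def detect_visual_elements(text_chunks: list[str]) -> bool:
--     # Single left-to-right positional scan per chunk: at each offset check
--     # whether any keyword starts there, instead of 11 independent substring
--     # searches over the whole chunk.
--     for chunk in text_chunks:
--         low = chunk.lower()
--         for i in range(len(low)):
--             if any(low.startswith(kw, i) for kw in _VISUAL_KEYWORDS):
--                 return True
--     return False
-- ===== Notes on version B (the rewrite author's own statement) =====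
-- stated objective: alternative
-- what changed: B replaces A's keyword-first loop of 11 full substring searches per chunk with a single positional scan: lowercase once, then walk the chunk offsets left to right and test at each offset whether any keyword starts there (startswith), short-circuiting on the first hit.
import Mathlib
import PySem

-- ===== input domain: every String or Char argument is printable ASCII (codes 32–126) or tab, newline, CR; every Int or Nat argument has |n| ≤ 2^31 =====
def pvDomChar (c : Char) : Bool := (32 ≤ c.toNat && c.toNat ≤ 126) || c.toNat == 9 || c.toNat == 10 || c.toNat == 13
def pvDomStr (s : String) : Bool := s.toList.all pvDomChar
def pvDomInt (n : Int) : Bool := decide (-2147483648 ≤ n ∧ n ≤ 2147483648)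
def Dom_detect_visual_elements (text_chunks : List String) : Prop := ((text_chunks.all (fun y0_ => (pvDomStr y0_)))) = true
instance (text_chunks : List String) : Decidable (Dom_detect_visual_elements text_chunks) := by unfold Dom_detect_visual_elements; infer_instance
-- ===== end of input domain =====

-- B replaces the keyword-first substring searches with a single positional startswith scan per chunk (alternative; return value only).
-- ===== PORT A =====
def pvVisualKeywords : List String :=
  ["figure", "diagram", "table", "chart", "graph", "image",
   "photo", "illustration", "visual", "picture", "snapshot"]

def detect_visual_elements (text_chunks : List String) : Bool :=
  text_chunks.any (fun chunk =>
    pvVisualKeywords.any (fun kw => PySem.Str.isIn kw (PySem.Str.lower chunk)))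

-- ===== PORT B =====
def detect_visual_elements_alt (text_chunks : List String) : Bool :=
  text_chunks.any (fun chunk =>
    let low := (PySem.Str.lower chunk).toList
    (List.range low.length).any (fun i =>
      pvVisualKeywords.any (fun kw => PySem.Chars.startswith (low.drop i) kw.toList)))

-- ===== PRECONDITION & SPEC =====
def Spec_detect_visual_elements (text_chunks : List String) (out : Bool) : Prop := out = detect_visual_elements_alt text_chunks
instance (text_chunks : List String) (out : Bool) : Decidable (Spec_detect_visual_elements text_chunks out) := by unfold Spec_detect_visual_elements; infer_instance

-- ===== CLAIM (what is proved, stated in full; the proofs are below) =====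
def Claim_equal_detect_visual_elements : Prop := ∀ (text_chunks : List String), Dom_detect_visual_elements text_chunks → Spec_detect_visual_elements text_chunks (detect_visual_elements text_chunks)

-- ===== LEMMAS AND PROOFS =====

-- ===== VERDICT (by name: the statement is the Claim_ definition above) =====
-- per-chunk equality: keyword-first substring search = position-first startswith scan
lemma pv_chunk_eq (low : List Char) :
    pvVisualKeywords.any (fun kw => PySem.Chars.isIn kw.toList low)
      = (List.range low.length).any (fun i =>
          pvVisualKeywords.any (fun kw => PySem.Chars.startswith (low.drop i) kw.toList)) := by
  rw [Bool.eq_iff_iff]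
  simp only [List.any_eq_true, List.mem_range, PySem.Chars.startswith_iff,
    PySem.Chars.isIn_iff_infix]
  constructor
  · rintro ⟨kw, hkw, hin⟩
    have h : ∃ j, kw.toList <+: low.drop j :=
      PySem.Chars.exists_prefix_drop_iff_isIn kw.toList low |>.mpr
        (by rwa [PySem.Chars.isIn_iff_infix])
    obtain ⟨j, hj⟩ := h
    have hne : kw.toList ≠ [] := by
      fin_cases hkw <;> decide
    have hjlt : j < low.length := by
      by_contra hge
      have : low.drop j = [] := List.drop_eq_nil_of_le (le_of_not_gt hge)
      rw [this] at hj
      exact hne (List.prefix_nil.mp hj)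
    exact ⟨j, hjlt, kw, hkw, hj⟩
  · rintro ⟨i, _, kw, hkw, hpre⟩
    exact ⟨kw, hkw, hpre.isInfix.trans (List.drop_suffix i low).isInfix⟩

theorem detect_visual_elements_spec : Claim_equal_detect_visual_elements := by
  intro text_chunks _
  unfold Spec_detect_visual_elements detect_visual_elements detect_visual_elements_alt
  congr 1
  funext chunk
  have := pv_chunk_eq ((PySem.Str.lower chunk).toList)
  simpa [PySem.Str.isIn, PySem.Chars.isIn] using this
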